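-- pv_equiv track=rewrite | github.com/Raheedpasha10/steganography_with_Ai_Integration | shared/steganography/text_steganography.py | _embed_whitespace
-- ===== SOURCE A (Python) =====
-- def _embed_whitespace(cover_text: str, secret_message: str) -> str:
--     """
--     Embed message using whitespace variation technique (tabs and spaces)
--
--     Args:
--         cover_text (str): The text to hide the message in
--         secret_message (str): The secret message to hide
--
--     Returns:
--         str: The steganographic text with hidden message
--     """
--     # Convert message to binary
--     binary_message = ''.join(format(ord(char), '08b') for char in secret_message)
--     binary_message += '00000000'  # End of message marker
--
--     # Split text into words
--     words = cover_text.split()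
--
--     # We need at least as many spaces as bits in our message
--     if len(words) - 1 < len(binary_message):
--         # If not enough spaces, duplicate words to create more spaces
--         while len(words) - 1 < len(binary_message):
--             # Add duplicate words at the end
--             words.append(words[len(words) % len(cover_text.split())])
--
--     # Encode each bit in the whitespace using different space characters
--     stego_words = []
--
--     for i in range(len(words)):
--         stego_words.append(words[i])
--         if i < len(words) - 1:  # Don't add space after last word
--             if i < len(binary_message):
--                 # If bit is 1, use tab, if 0, use single space
--                 space = '\t' if binary_message[i] == '1' else ' '
--                 stego_words.append(space)
--             else:
--                 # Use regular space for remaining positions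
--                 stego_words.append(' ')
--
--     return ''.join(stego_words)
-- ===== SOURCE B (Python) =====
-- def _embed_whitespace(cover_text: str, secret_message: str) -> str:
--     # Different strategy: pad the word list by whole-list replication and
--     # slicing, lay out the baseline text with plain single spaces via one
--     # ' '.join, then PATCH that string: for each message bit locate the next
--     # space with str.find and splice in a tab where the bit is 1 (the
--     # end-of-message marker bits are all 0, so they never flip a space).
--     words = cover_text.split()
--     L = 8 * (len(secret_message) + 1)  # bit count including the marker byte
--     if len(words) - 1 < L:
--         reps = (L + len(words)) // len(words)  # ZeroDivisionError if no words, as in the original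
--         words = (words * reps)[:L + 1]
--     base = ' '.join(words)
--     bits = ''.join(format(ord(c), '08b') for c in secret_message)
--     parts = []
--     cut = 0
--     pos = 0
--     for b in bits:
--         idx = base.find(' ', pos)
--         if idx == -1:
--             break
--         if b == '1':
--             parts.append(base[cut:idx])
--             parts.append('\t')
--             cut = idx + 1
--         pos = idx + 1
--     parts.append(base[cut:])
--     return ''.join(parts)
-- ===== Notes on version B (the rewrite author's own statement) =====
-- stated objective: alternative
-- what changed: Instead of growing the word list with a while-loop and interleaving words and separators in a position-indexed loop, B pads by replicating the whole word list and slicing, lays out a baseline text with one ' '.join, and then patches that string: for each message bit it locates the next space with str.find and splices in a tab where the bit is 1.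
import Mathlib
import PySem

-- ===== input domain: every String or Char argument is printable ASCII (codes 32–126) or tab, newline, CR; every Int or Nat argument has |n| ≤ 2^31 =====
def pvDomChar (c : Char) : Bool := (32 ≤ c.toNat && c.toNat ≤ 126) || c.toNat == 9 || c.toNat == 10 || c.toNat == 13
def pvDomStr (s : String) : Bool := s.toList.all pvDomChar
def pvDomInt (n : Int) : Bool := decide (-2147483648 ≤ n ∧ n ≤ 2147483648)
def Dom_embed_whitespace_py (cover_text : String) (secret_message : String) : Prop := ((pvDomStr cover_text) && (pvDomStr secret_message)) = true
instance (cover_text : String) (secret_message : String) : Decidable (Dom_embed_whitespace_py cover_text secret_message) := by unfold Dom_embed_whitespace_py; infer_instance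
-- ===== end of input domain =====

-- B replaces A's grow-while-loop plus word-by-word interleaving by a different strategy:
-- pad the word list by whole-list replication and slicing, lay out the baseline text with
-- ' '.join, then PATCH that string: for each message bit locate the next space with find
-- and splice in a tab where the bit is 1; an alternative decomposition.

-- ===== PORT A =====
-- format(ord(char), '08b'): the 8 binary digits, msb first; exact for ord(char) < 256
-- (guaranteed: Dom admits only ASCII characters, codes ≤ 126)
def pvBits8 (n : Nat) : List Char :=
  (List.range 8).map (fun i => if (n >>> (7 - i)) % 2 == 1 then '1' else '0')

-- while len(words) - 1 < L: words.append(words[len(words) % n0]).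
-- Condition 'len - 1 < L' over Python ints is 'len < L + 1' over Nat (len ≥ 0).
-- words[len(words) % n0]: getD is exact here since len % n0 < n0 ≤ len whenever n0 ≥ 1
-- (Pre_ requires n0 ≥ 1; for n0 = 0 Python raises ZeroDivisionError).
def pvWhilePad (n0 L : Nat) (words : List (List Char)) : List (List Char) :=
  if words.length < L + 1 then
    pvWhilePad n0 L (words ++ [words.getD (words.length % n0) []])
  else words
termination_by L + 1 - words.length
decreasing_by simp; omega

def embed_whitespace_py (cover_text : String) (secret_message : String) : String :=
  -- binary_message = ''.join(format(ord(c), '08b') for c in secret_message) + '00000000'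
  let binary_message : List Char :=
    (secret_message.toList.flatMap (fun c => pvBits8 c.toNat)) ++ ['0','0','0','0','0','0','0','0']
  let words := PySem.Chars.split₀ cover_text.toList
  -- if len(words) - 1 < len(binary_message): while-loop (n0 = len(cover_text.split()))
  let words :=
    if words.length < binary_message.length + 1 then
      pvWhilePad words.length binary_message.length words
    else words
  -- for i in range(len(words)): … (all indices i are in range, so getD is exact)
  let stego_words : List (List Char) :=
    (List.range words.length).foldl (fun acc i =>
      let acc := acc ++ [words.getD i []]
      if i < words.length - 1 then
        if i < binary_message.length then
          acc ++ [if binary_message.getD i ' ' == '1' then ['\t'] else [' ']]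
        else
          acc ++ [[' ']]
      else acc) []
  String.ofList (PySem.Chars.join [] stego_words)

-- ===== PORT B =====
-- B's patch loop: 'for b in bits: idx = base.find(' ', pos); if idx == -1: break;
-- if b == '1': parts += [base[cut:idx], '\t']; cut = idx + 1; pos = idx + 1' and the final
-- 'parts.append(base[cut:])' (done in both exits); find and slices via PySem, exact
def pvPatch (base : List Char) : List Char → Int → Int → List (List Char) → List (List Char)
  | [], cut, _pos, parts => parts ++ [PySem.List.slice base (some cut) none]
  | b :: rest, cut, pos, parts =>
    let idx := PySem.Chars.findFrom base [' '] pos none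
    if idx == -1 then parts ++ [PySem.List.slice base (some cut) none]
    else if b == '1' then
      pvPatch base rest (idx + 1) (idx + 1)
        (parts ++ [PySem.List.slice base (some cut) (some idx), ['\t']])
    else pvPatch base rest cut (idx + 1) parts

def embed_whitespace_py_alt (cover_text : String) (secret_message : String) : String :=
  let words0 := PySem.Chars.split₀ cover_text.toList
  -- L = 8 * (len(secret_message) + 1)
  let L := 8 * (secret_message.toList.length + 1)
  -- if len(words)-1 < L: reps = (L + len(words)) // len(words); words = (words*reps)[:L+1]
  -- (ZeroDivisionError when there are no words, as in A; Pre_ excludes that; '//' on these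
  -- nonnegative values is Nat division, exact)
  let words :=
    if words0.length < L + 1 then
      ((List.replicate ((L + words0.length) / words0.length) words0).flatten).take (L + 1)
    else words0
  -- base = ' '.join(words)
  let base := PySem.Chars.join [' '] words
  -- bits = ''.join(format(ord(c), '08b') for c in secret_message)
  let bits : List Char := secret_message.toList.flatMap (fun c => pvBits8 c.toNat)
  -- the patch loop over bits (cut = pos = 0), then ''.join(parts)
  String.ofList (PySem.Chars.join [] (pvPatch base bits 0 0 []))

-- ===== PRECONDITION & SPEC =====
-- Pre_ excludes exactly the inputs where cover_text has no words: there Python A (and B)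
-- raise ZeroDivisionError.
def Pre_embed_whitespace_py (cover_text : String) (secret_message : String) : Prop :=
  PySem.Chars.split₀ cover_text.toList ≠ []
instance (cover_text : String) (secret_message : String) : Decidable (Pre_embed_whitespace_py cover_text secret_message) := by unfold Pre_embed_whitespace_py; infer_instance

def pvWitness_embed_whitespace_py : String × String := ("hide me here", "")

def Spec_embed_whitespace_py (cover_text : String) (secret_message : String) (out : String) : Prop := out = embed_whitespace_py_alt cover_text secret_message
instance (cover_text : String) (secret_message : String) (out : String) : Decidable (Spec_embed_whitespace_py cover_text secret_message out) := by unfold Spec_embed_whitespace_py; infer_instance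

-- ===== CLAIM (what is proved, stated in full; the proofs are below) =====
def Claim_equal_embed_whitespace_py : Prop := ∀ (cover_text : String) (secret_message : String), Dom_embed_whitespace_py cover_text secret_message → Pre_embed_whitespace_py cover_text secret_message → Spec_embed_whitespace_py cover_text secret_message (embed_whitespace_py cover_text secret_message)

-- ===== LEMMAS AND PROOFS =====

-- proof-only model of B's patching: a character-level scan with a gap counter that
-- writes tab at the g-th space when bit g is 1
def pvStep (bits : List Char) (st : Nat × List Char) (ch : Char) : Nat × List Char :=
  if ch == ' ' then
    (st.1 + 1,
     st.2 ++ [if st.1 < bits.length then (if bits.getD st.1 ' ' == '1' then '\t' else ch) else ch])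
  else (st.1, st.2 ++ [ch])

-- the separator character B's pass writes at gap number g
def pvSep (bits : List Char) (g : Nat) : Char :=
  if g < bits.length then (if bits.getD g ' ' == '1' then '\t' else ' ') else ' '

-- the interleaving B's pass produces, recursively over the word list
def pvInterB (bits : List Char) : Nat → List (List Char) → List Char
  | _, [] => []
  | _, [w] => w
  | g, w :: v :: rest => w ++ pvSep bits g :: pvInterB bits (g + 1) (v :: rest)

-- ''.join over a list of strings is flatten
lemma pv_join_nil_flatten : ∀ ps : List (List Char), PySem.Chars.join [] ps = ps.flatten
  | [] => by simp [PySem.Chars.join, List.intercalate]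
  | [x] => by simp [PySem.Chars.join, List.intercalate]
  | x :: y :: r => by
    have ih := pv_join_nil_flatten (y :: r)
    simp only [PySem.Chars.join, List.intercalate] at ih ⊢
    rw [show List.intersperse ([] : List Char) (x :: y :: r)
          = x :: [] :: List.intersperse [] (y :: r) from rfl]
    simp [ih]

lemma pv_flatten_flatMap : ∀ (l : List Nat) (g : Nat → List (List Char)),
    (l.flatMap g).flatten = l.flatMap (fun a => (g a).flatten)
  | [], _ => by simp
  | a :: t, g => by simp [pv_flatten_flatMap t g]

-- the while-loop appends exactly the cyclic duplicates of the original word list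
lemma pv_pad_eq (ws0 : List (List Char)) (h1 : 1 ≤ ws0.length) (L : Nat) :
    ∀ (m : Nat) (ws : List (List Char)), ws0 <+: ws → m = L + 1 - ws.length →
      pvWhilePad ws0.length L ws
        = ws ++ (List.range' ws.length (L + 1 - ws.length)).map
            (fun k => ws0.getD (k % ws0.length) []) := by
  intro m
  induction m with
  | zero =>
    intro ws _ hm
    rw [pvWhilePad]
    have hlen : ¬ ws.length < L + 1 := by omega
    simp [hlen, show L + 1 - ws.length = 0 by omega]
  | succ m ih =>
    intro ws hpre hm
    have hlen : ws.length < L + 1 := by omega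
    rw [pvWhilePad]
    simp only [hlen, if_true]
    have hidx : ws.length % ws0.length < ws0.length := Nat.mod_lt _ (by omega)
    have hget : ws.getD (ws.length % ws0.length) [] = ws0.getD (ws.length % ws0.length) [] := by
      obtain ⟨t, rfl⟩ := hpre
      rw [List.getD_eq_getElem?_getD, List.getD_eq_getElem?_getD,
          List.getElem?_append_left hidx]
    rw [hget]
    rw [ih _ (hpre.trans (List.prefix_append _ _))
          (by rw [List.length_append, List.length_singleton]; omega)]
    rw [List.length_append, List.length_singleton]
    have hr : List.range' ws.length (L + 1 - ws.length)
        = ws.length :: List.range' (ws.length + 1) (L + 1 - (ws.length + 1)) := by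
      rw [show L + 1 - ws.length = (L + 1 - (ws.length + 1)) + 1 by omega]
      rw [List.range'_succ]
    rw [hr]
    simp

-- the cyclic word table, as a map over an index range
def pvCyc (ws0 : List (List Char)) (m : Nat) : List (List Char) :=
  (List.range m).map (fun k => ws0.getD (k % ws0.length) [])

-- the first |ws0| entries of the cyclic table are ws0 itself
lemma pv_cyc_prefix (ws0 : List (List Char)) :
    (List.range ws0.length).map (fun k => ws0.getD (k % ws0.length) []) = ws0 := by
  apply List.ext_getElem
  · simp
  · intro i h1 h2
    simp only [List.getElem_map, List.getElem_range]
    rw [Nat.mod_eq_of_lt (by simpa using h2), List.getD_eq_getElem?_getD,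
        List.getElem?_eq_getElem (by simpa using h2)]
    rfl

-- A's padded word list is the cyclic table
lemma pv_pad_cyc (ws0 : List (List Char)) (h1 : 1 ≤ ws0.length) (L : Nat)
    (h : ws0.length < L + 1) :
    pvWhilePad ws0.length L ws0 = pvCyc ws0 (L + 1) := by
  rw [pv_pad_eq ws0 h1 L (L + 1 - ws0.length) ws0 (List.prefix_refl _) rfl]
  unfold pvCyc
  rw [show L + 1 = ws0.length + (L + 1 - ws0.length) by omega, List.range_add,
      List.map_append, pv_cyc_prefix, List.range'_eq_map_range, List.map_map]
  simp [List.map_map]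

-- B's replicated-and-sliced word list is the same cyclic table
lemma pv_flatten_replicate (ws0 : List (List Char)) :
    ∀ r : Nat, (List.replicate r ws0).flatten = pvCyc ws0 (r * ws0.length) := by
  intro r
  induction r with
  | zero => simp [pvCyc]
  | succ r ih =>
    rw [List.replicate_succ, List.flatten_cons, ih]
    unfold pvCyc
    rw [show (r + 1) * ws0.length = ws0.length + r * ws0.length by ring, List.range_add,
        List.map_append, pv_cyc_prefix, List.map_map]
    congr 1
    apply List.map_congr_left
    intro j _
    simp [Nat.add_mod_left]

lemma pv_slice_cyc (ws0 : List (List Char)) (h1 : 1 ≤ ws0.length) (L : Nat) :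
    ((List.replicate ((L + ws0.length) / ws0.length) ws0).flatten).take (L + 1)
      = pvCyc ws0 (L + 1) := by
  rw [pv_flatten_replicate ws0]
  unfold pvCyc
  rw [← List.map_take, List.take_range]
  congr 1
  rw [Nat.min_eq_left ?hle]
  case hle =>
    have hd := Nat.div_add_mod (L + ws0.length) ws0.length
    have hmlt : (L + ws0.length) % ws0.length < ws0.length := Nat.mod_lt _ (by omega)
    have hge : ws0.length * ((L + ws0.length) / ws0.length) ≥ L + 1 := by omega
    rw [Nat.mul_comm] at hge
    omega

lemma pv_go_nil (cur : List Char) (acc : List (List Char)) :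
    PySem.Chars.split₀.go [] cur acc
      = if cur.isEmpty then acc.reverse else (cur.reverse :: acc).reverse := rfl

lemma pv_go_cons (c : Char) (rest cur : List Char) (acc : List (List Char)) :
    PySem.Chars.split₀.go (c :: rest) cur acc
      = if PySem.Chars.isspace c then
          (if cur.isEmpty then PySem.Chars.split₀.go rest [] acc
           else PySem.Chars.split₀.go rest [] (cur.reverse :: acc))
        else PySem.Chars.split₀.go rest (c :: cur) acc := rfl

-- no word produced by split() contains a whitespace character
lemma pv_split_go_nospace : ∀ (s cur : List Char) (acc : List (List Char)),
    (∀ c ∈ cur, PySem.Chars.isspace c = false) →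
    (∀ w ∈ acc, ∀ c ∈ w, PySem.Chars.isspace c = false) →
    ∀ w ∈ PySem.Chars.split₀.go s cur acc, ∀ c ∈ w, PySem.Chars.isspace c = false := by
  intro s
  induction s with
  | nil =>
    intro cur acc hcur hacc w hw
    rw [pv_go_nil] at hw
    by_cases he : cur.isEmpty
    · rw [if_pos he, List.mem_reverse] at hw
      exact hacc w hw
    · rw [if_neg he, List.mem_reverse, List.mem_cons] at hw
      rcases hw with hw | hw
      · subst hw; intro c hc; exact hcur c (by simpa using hc)
      · exact hacc w hw
  | cons a t ih =>
    intro cur acc hcur hacc w hw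
    rw [pv_go_cons] at hw
    by_cases hs : PySem.Chars.isspace a
    · rw [if_pos hs] at hw
      by_cases he : cur.isEmpty
      · rw [if_pos he] at hw
        exact ih [] acc (by simp) hacc w hw
      · rw [if_neg he] at hw
        refine ih [] _ (by simp) ?_ w hw
        intro v hv
        rw [List.mem_cons] at hv
        rcases hv with hv | hv
        · subst hv; intro c hc; rw [List.mem_reverse] at hc; exact hcur c hc
        · exact hacc v hv
    · rw [if_neg hs] at hw
      refine ih (a :: cur) acc ?_ hacc w hw
      intro c hc
      rw [List.mem_cons] at hc
      rcases hc with hc | hc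
      · subst hc; simpa using hs
      · exact hcur c hc

lemma pv_split_nospace (s : List Char) :
    ∀ w ∈ PySem.Chars.split₀ s, ∀ c ∈ w, c ≠ ' ' := by
  intro w hw c hc
  have := pv_split_go_nospace s [] [] (by simp) (by simp) w hw c hc
  intro h
  rw [h] at this
  simp [PySem.Chars.isspace] at this

-- scanning a word with no spaces just copies it, leaving the gap counter alone
lemma pv_scan_word (bits : List Char) :
    ∀ (w : List Char), (∀ c ∈ w, c ≠ ' ') → ∀ (g : Nat) (acc : List Char),
      w.foldl (pvStep bits) (g, acc) = (g, acc ++ w) := by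
  intro w
  induction w with
  | nil => intro _ g acc; simp
  | cons c t ih =>
    intro h g acc
    have hc : c ≠ ' ' := h c (by simp)
    rw [List.foldl_cons, show pvStep bits (g, acc) c = (g, acc ++ [c]) by
      simp [pvStep, hc]]
    rw [ih (fun x hx => h x (by simp [hx])) g (acc ++ [c])]
    simp

lemma pv_intercalate_cons_cons (s w v : List Char) (rest : List (List Char)) :
    List.intercalate s (w :: v :: rest) = w ++ s ++ List.intercalate s (v :: rest) := by
  simp [List.intercalate, List.intersperse]

-- scanning ' '.join(W) produces the interleaving pvInterB
lemma pv_scan_inter (bits : List Char) :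
    ∀ (W : List (List Char)), (∀ w ∈ W, ∀ c ∈ w, c ≠ ' ') → ∀ (g : Nat) (acc : List Char),
      (List.intercalate [' '] W).foldl (pvStep bits) (g, acc)
        = (g + (W.length - 1), acc ++ pvInterB bits g W) := by
  intro W
  induction W with
  | nil => intro _ g acc; simp [List.intercalate, pvInterB]
  | cons w t ih =>
    intro h g acc
    cases t with
    | nil =>
      rw [show List.intercalate [' '] [w] = w by simp [List.intercalate]]
      rw [pv_scan_word bits w (h w (by simp)) g acc]
      simp [pvInterB]
    | cons v rest =>
      rw [pv_intercalate_cons_cons, List.append_assoc, List.foldl_append,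
          pv_scan_word bits w (h w (by simp)) g acc, List.singleton_append, List.foldl_cons,
          show pvStep bits (g, acc ++ w) ' ' = (g + 1, (acc ++ w) ++ [pvSep bits g]) by
            simp [pvStep, pvSep]]
      rw [ih (fun x hx => h x (by simp [hx])) (g + 1) ((acc ++ w) ++ [pvSep bits g])]
      rw [Prod.mk.injEq]
      refine ⟨by simp only [List.length_cons]; omega, ?_⟩
      rw [show pvInterB bits g (w :: v :: rest)
            = w ++ pvSep bits g :: pvInterB bits (g + 1) (v :: rest) from rfl]
      simp

-- the recursive interleaving, as an index loop
lemma pv_interB_flatMap (bits : List Char) :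
    ∀ (W : List (List Char)) (g : Nat), W ≠ [] →
      pvInterB bits g W
        = W.getD 0 [] ++ (List.range (W.length - 1)).flatMap
            (fun i => pvSep bits (g + i) :: W.getD (i + 1) []) := by
  intro W
  induction W with
  | nil => intro g h; exact absurd rfl h
  | cons w t ih =>
    intro g _
    cases t with
    | nil => simp [pvInterB]
    | cons v rest =>
      rw [show pvInterB bits g (w :: v :: rest)
            = w ++ pvSep bits g :: pvInterB bits (g + 1) (v :: rest) from rfl,
          ih (g + 1) (by simp)]
      simp only [List.length_cons, Nat.add_sub_cancel, List.range_succ_eq_map,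
        List.flatMap_cons, List.flatMap_map, List.getD_cons_zero, List.getD_cons_succ,
        Nat.add_zero]
      rw [List.flatMap_congr (l := List.range rest.length)
            (g := fun a => pvSep bits (g + a.succ) :: rest.getD a [])
            (by intro i _; rw [show g + 1 + i = g + i.succ by omega])]
      simp

-- interleaving identity: words with trailing separators, last word bare,
-- equals first word bare then separator-word pairs
lemma pv_interleave_shift (f g : Nat → List Char) :
    ∀ n : Nat, (List.range n).flatMap (fun i => f i ++ g i) ++ f n
      = f 0 ++ (List.range n).flatMap (fun i => g i ++ f (i + 1)) := by
  intro n
  induction n with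
  | zero => simp
  | succ n ih =>
    rw [List.range_succ]
    simp only [List.flatMap_append, List.flatMap_cons, List.flatMap_nil, List.append_nil]
    calc ((List.range n).flatMap (fun i => f i ++ g i) ++ (f n ++ g n)) ++ f (n + 1)
        = (((List.range n).flatMap (fun i => f i ++ g i) ++ f n) ++ g n) ++ f (n + 1) := by
          simp [List.append_assoc]
      _ = ((f 0 ++ (List.range n).flatMap (fun i => g i ++ f (i + 1))) ++ g n) ++ f (n + 1) := by
          rw [ih]
      _ = f 0 ++ ((List.range n).flatMap (fun i => g i ++ f (i + 1)) ++ (g n ++ f (n + 1))) := by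
          simp [List.append_assoc]

-- A's index loop over any padded word list W with at least bin.length gaps, flattened
lemma pv_coreA (bin : List Char) (W : List (List Char)) (hm : bin.length + 1 ≤ W.length) :
    PySem.Chars.join [] ((List.range W.length).foldl (fun acc i =>
        let acc := acc ++ [W.getD i []]
        if i < W.length - 1 then
          if i < bin.length then
            acc ++ [if bin.getD i ' ' == '1' then ['\t'] else [' ']]
          else acc ++ [[' ']]
        else acc) [])
    = W.getD 0 [] ++ (List.range (W.length - 1)).flatMap
        (fun i => (if i < bin.length then (if bin.getD i ' ' == '1' then ['\t'] else [' '])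
                   else [' ']) ++ W.getD (i + 1) []) := by
  set L := bin.length with hL
  set n := W.length - 1 with hn
  have hmn : W.length = n + 1 := by omega
  have hLn : L ≤ n := by omega
  have hbody : (fun (acc : List (List Char)) i =>
      let acc := acc ++ [W.getD i []]
      if i < W.length - 1 then
        if i < L then
          acc ++ [if bin.getD i ' ' == '1' then ['\t'] else [' ']]
        else acc ++ [[' ']]
      else acc)
      = fun acc i => acc ++ ([W.getD i []] ++ if i < n then
          [if i < L then (if bin.getD i ' ' == '1' then ['\t'] else [' ']) else [' ']] else []) := by
    funext acc i
    rw [← hn]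
    by_cases h1 : i < n <;> by_cases h2 : i < L <;> simp [h1, h2]
  rw [hbody, PySem.List.foldl_append_eq_flatMap, List.nil_append,
      pv_join_nil_flatten, pv_flatten_flatMap]
  have hchunk : (fun i => (([W.getD i []] ++ if i < n then
          [if i < L then (if bin.getD i ' ' == '1' then ['\t'] else [' ']) else [' ']] else []) : List (List Char)).flatten)
      = fun i => W.getD i [] ++ (if i < n then
          (if i < L then (if bin.getD i ' ' == '1' then ['\t'] else [' ']) else [' ']) else []) := by
    funext i
    by_cases h1 : i < n <;> simp [h1]
  rw [hchunk, hmn, List.range_succ, List.flatMap_append, List.flatMap_cons, List.flatMap_nil]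
  simp only [lt_irrefl, if_false, List.append_nil]
  rw [List.flatMap_congr (l := List.range n)
        (g := fun i => W.getD i [] ++ (if i < L then (if bin.getD i ' ' == '1' then ['\t'] else [' ']) else [' ']))
        (by intro a ha; rw [List.mem_range] at ha; simp [ha])]
  rw [pv_interleave_shift (fun i => W.getD i [])
        (fun i => if i < L then (if bin.getD i ' ' == '1' then ['\t'] else [' ']) else [' ']) n]

-- A's separator list at gap i equals B's separator character (bin = bits + marker byte)
lemma pv_sep_eq (bits : List Char) (i : Nat) :
    (if i < (bits ++ ['0','0','0','0','0','0','0','0']).length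
       then (if (bits ++ ['0','0','0','0','0','0','0','0']).getD i ' ' == '1'
             then ['\t'] else [' '])
       else ([' '] : List Char))
    = [pvSep bits i] := by
  unfold pvSep
  by_cases h1 : i < bits.length
  · have h2 : i < (bits ++ ['0','0','0','0','0','0','0','0']).length := by simp; omega
    rw [if_pos h1, if_pos h2, List.getD_eq_getElem?_getD, List.getElem?_append_left h1,
        ← List.getD_eq_getElem?_getD]
    split_ifs <;> rfl
  · rw [if_neg h1]
    by_cases h2 : i < (bits ++ ['0','0','0','0','0','0','0','0']).length
    · rw [if_pos h2]
      have h4 : i - bits.length < 8 := by simp at h2; omega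
      have hz : (bits ++ ['0','0','0','0','0','0','0','0']).getD i ' ' = '0' := by
        rw [List.getD_eq_getElem?_getD, List.getElem?_append_right (by omega),
            show (['0','0','0','0','0','0','0','0'] : List Char) = List.replicate 8 '0' from rfl,
            List.getElem?_replicate, if_pos h4]
        rfl
      rw [hz]
      simp
    · rw [if_neg h2]

lemma pv_sep_cons (bits : List Char) (i : Nat) (X : List Char) :
    (if i < (bits ++ ['0','0','0','0','0','0','0','0']).length
       then (if (bits ++ ['0','0','0','0','0','0','0','0']).getD i ' ' == '1'
             then ['\t'] else [' '])
       else ([' '] : List Char)) ++ X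
    = pvSep bits i :: X := by
  rw [pv_sep_eq bits i]
  rfl

lemma pv_bits_len (l : List Char) :
    (l.flatMap (fun c => pvBits8 c.toNat)).length = 8 * l.length := by
  induction l with
  | nil => simp
  | cons c t ih => simp [pvBits8]; ring

-- with no bits left, the scan copies its input
lemma pv_scan_nil_bits :
    ∀ (s : List Char) (g : Nat) (acc : List Char),
      s.foldl (pvStep []) (g, acc) = (g + (s.count ' '), acc ++ s) := by
  intro s
  induction s with
  | nil => intro g acc; simp
  | cons ch t ih =>
    intro g acc
    by_cases hch : ch = ' '
    · subst hch
      rw [List.foldl_cons, show pvStep [] (g, acc) ' ' = (g + 1, acc ++ [' ']) by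
        simp [pvStep], ih]
      simp [List.count_cons]
      omega
    · rw [List.foldl_cons, show pvStep [] (g, acc) ch = (g, acc ++ [ch]) by
        simp [pvStep, hch], ih]
      simp [List.count_cons, hch]

-- prepending a bit shifts the gap counter by one
lemma pv_step_shift (b : Char) (bits : List Char) :
    ∀ (s : List Char) (g : Nat) (acc : List Char),
      s.foldl (pvStep (b :: bits)) (g + 1, acc)
        = ((s.foldl (pvStep bits) (g, acc)).1 + 1, (s.foldl (pvStep bits) (g, acc)).2) := by
  intro s
  induction s with
  | nil => intro g acc; rfl
  | cons ch t ih =>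
    intro g acc
    by_cases hch : ch = ' '
    · subst hch
      rw [List.foldl_cons, List.foldl_cons,
          show pvStep (b :: bits) (g + 1, acc) ' '
            = (g + 1 + 1, acc ++ [if g < bits.length
                then (if bits.getD g ' ' == '1' then '\t' else ' ') else ' ']) by
            simp [pvStep],
          show pvStep bits (g, acc) ' '
            = (g + 1, acc ++ [if g < bits.length
                then (if bits.getD g ' ' == '1' then '\t' else ' ') else ' ']) by
            simp [pvStep]]
      exact ih (g + 1) _
    · rw [List.foldl_cons, List.foldl_cons,
          show pvStep (b :: bits) (g + 1, acc) ch = (g + 1, acc ++ [ch]) by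
            simp [pvStep, hch],
          show pvStep bits (g, acc) ch = (g, acc ++ [ch]) by simp [pvStep, hch]]
      exact ih g _

-- the accumulator factors out of the scan
lemma pv_scan_acc (bits : List Char) :
    ∀ (s : List Char) (g : Nat) (acc : List Char),
      s.foldl (pvStep bits) (g, acc)
        = ((s.foldl (pvStep bits) (g, [])).1, acc ++ (s.foldl (pvStep bits) (g, [])).2) := by
  intro s
  induction s with
  | nil => intro g acc; simp
  | cons ch t ih =>
    intro g acc
    have hstep : ∀ (a : List Char), pvStep bits (g, a) ch
        = ((pvStep bits (g, ([] : List Char)) ch).1, a ++ (pvStep bits (g, []) ch).2) := by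
      intro a
      simp only [pvStep]
      split_ifs <;> simp
    rw [List.foldl_cons, List.foldl_cons, hstep acc, ih]
    conv_rhs => rw [ih]
    simp [List.append_assoc]

-- scanning past the first space consumes the first bit
lemma pv_scan_split (b : Char) (bits : List Char) (pp qq : List Char)
    (hpp : ∀ c ∈ pp, c ≠ ' ') :
    ((pp ++ ' ' :: qq).foldl (pvStep (b :: bits)) (0, [])).2
      = pp ++ (if b == '1' then '\t' else ' ') :: (qq.foldl (pvStep bits) (0, [])).2 := by
  rw [List.foldl_append, pv_scan_word (b :: bits) pp hpp 0 [], List.foldl_cons,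
      show pvStep (b :: bits) (0, ([] : List Char) ++ pp) ' '
        = (0 + 1, pp ++ [if b == '1' then '\t' else ' ']) by simp [pvStep],
      pv_step_shift, pv_scan_acc]
  simp

-- a space sits at index i iff [' '] is a prefix of the drop
lemma pv_prefix_space_iff (s : List Char) (i : Nat) (h : i < s.length) :
    ([' '] <+: s.drop i) ↔ s[i] = ' ' := by
  rw [List.drop_eq_getElem_cons h, List.cons_prefix_cons]
  simp [eq_comm]

-- B's patch loop, characterised against the scan model
lemma pv_patch_eq (base : List Char) :
    ∀ (bits : List Char) (c p : Nat) (parts : List (List Char)),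
      c ≤ p → p ≤ base.length →
      PySem.Chars.join [] (pvPatch base bits (c : Int) (p : Int) parts)
        = parts.flatten ++ (base.drop c).take (p - c)
            ++ ((base.drop p).foldl (pvStep bits) (0, [])).2 := by
  intro bits
  induction bits with
  | nil =>
    intro c p parts hcp hpl
    rw [show pvPatch base [] (c : Int) (p : Int) parts
          = parts ++ [PySem.List.slice base (some (c : Int)) none] from rfl,
        pv_join_nil_flatten, PySem.List.slice_from_natCast, pv_scan_nil_bits]
    simp only [List.flatten_append, List.flatten_cons, List.flatten_nil, List.append_nil,
      List.nil_append, List.append_assoc]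
    congr 1
    rw [show base.drop p = (base.drop c).drop (p - c) by
          rw [List.drop_drop]; congr 1; omega]
    exact (List.take_append_drop _ _).symm
  | cons b rest ih =>
    intro c p parts hcp hpl
    have hff := PySem.Chars.findFrom_natCast base [' '] p hpl
    rw [show pvPatch base (b :: rest) (c : Int) (p : Int) parts
          = (let idx := PySem.Chars.findFrom base [' '] (p : Int) none;
             if idx == -1 then parts ++ [PySem.List.slice base (some (c : Int)) none]
             else if b == '1' then
               pvPatch base rest (idx + 1) (idx + 1)
                 (parts ++ [PySem.List.slice base (some (c : Int)) (some idx), ['\t']])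
             else pvPatch base rest (c : Int) (idx + 1) parts) from rfl]
    have htake : ∀ j : Nat, (base.drop c).take (p + j - c)
        = (base.drop c).take (p - c) ++ (base.drop p).take j := by
      intro j
      rw [show p + j - c = (p - c) + j by omega, List.take_add,
          show (base.drop c).drop (p - c) = base.drop p by
            rw [List.drop_drop]; congr 1; omega]
    by_cases hsp : [' '] <:+: base.drop p
    · -- a space exists at or after pos
      have hnn : 0 ≤ PySem.Chars.find (base.drop p) [' '] :=
        (PySem.Chars.find_nonneg_iff _ _).mpr hsp
      set k := (PySem.Chars.find (base.drop p) [' ']).toNat with hk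
      have hkcast : PySem.Chars.find (base.drop p) [' '] = (k : Int) :=
        (Int.toNat_of_nonneg hnn).symm
      have hspec := PySem.Chars.find_spec (s := base.drop p) (sub := [' ']) hnn
      have hkpre : [' '] <+: (base.drop p).drop k := by rw [hk]; exact hspec.1
      have hkmin : ∀ i < k, ¬ [' '] <+: (base.drop p).drop i := by
        rw [hk]; exact hspec.2
      have hklen : p + k < base.length := by
        have h1 := hkpre.length_le
        simp at h1
        omega
      have he : (base.drop p).drop k = base.drop (p + k) := by
        rw [List.drop_drop]
      have hsp_at : base[p + k]'hklen = ' ' := by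
        exact (pv_prefix_space_iff base (p + k) hklen).mp (he ▸ hkpre)
      have hppns : ∀ ch ∈ (base.drop p).take k, ch ≠ ' ' := by
        intro ch hch
        rw [List.mem_iff_getElem] at hch
        obtain ⟨i, hi, rfl⟩ := hch
        have hik : i < k := by
          simp [List.length_take] at hi
          omega
        intro hsp'
        apply hkmin i hik
        have hilen : i < (base.drop p).length := by
          simp
          omega
        rw [pv_prefix_space_iff _ i hilen]
        rw [List.getElem_take] at hsp'
        exact hsp'
      have hdecomp : base.drop p
          = (base.drop p).take k ++ ' ' :: base.drop (p + k + 1) := by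
        conv_lhs => rw [← List.take_append_drop k (base.drop p)]
        rw [he, List.drop_eq_getElem_cons hklen, hsp_at]
      have hfne : (((p : Int) + (k : Int) == -1)) = false := by
        simp
        omega
      have hflat : PySem.Chars.findFrom base [' '] (p : Int) none = (p : Int) + (k : Int) := by
        rw [hff, hkcast, if_neg (show ¬((k : Int) = -1) by omega)]
      rw [hflat]
      simp only [hfne, Bool.false_eq_true, if_false]
      have hcast1 : ((p : Int) + (k : Int) + 1) = ((p + k + 1 : Nat) : Int) := by
        push_cast; ring
      have hcastk : ((p : Int) + (k : Int)) = ((p + k : Nat) : Int) := by push_cast; ring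
      by_cases hb : (b == '1') = true
      · rw [if_pos hb, hcast1, hcastk,
            ih (p + k + 1) (p + k + 1) _ (Nat.le_refl _) (by omega)]
        rw [PySem.List.slice_natCast]
        simp only [List.flatten_append, List.flatten_cons, List.flatten_nil,
          List.append_nil, Nat.sub_self, List.take_zero, List.nil_append, List.append_assoc]
        rw [hdecomp, pv_scan_split b rest _ _ hppns, htake k, hb]
        simp [List.append_assoc]
      · rw [if_neg hb, hcast1,
            ih c (p + k + 1) parts (by omega) (by omega)]
        rw [hdecomp, pv_scan_split b rest _ _ hppns,
            show p + k + 1 - c = p + (k + 1) - c by omega, htake (k + 1)]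
        have htk1 : (base.drop p).take (k + 1) = (base.drop p).take k ++ [' '] := by
          rw [List.take_succ]
          congr 1
          rw [List.getElem?_eq_getElem (by simp; omega)]
          simp only [List.getElem_drop]
          rw [show base[p + k]'(by omega) = ' ' from hsp_at]
          rfl
        rw [htk1, if_neg hb]
        simp [List.append_assoc]
    · -- no space at or after pos: find = -1, the loop breaks
      have hf1 : PySem.Chars.find (base.drop p) [' '] = -1 := by
        by_contra hne
        exact hsp ((PySem.Chars.find_ne_neg_one_iff _ _).mp hne)
      have hfeq : (PySem.Chars.findFrom base [' '] (p : Int) none == -1) = true := by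
        rw [hff, if_pos hf1]; rfl
      simp only [hfeq, if_true]
      rw [pv_join_nil_flatten, PySem.List.slice_from_natCast]
      have hns : ∀ ch ∈ base.drop p, ch ≠ ' ' := by
        intro ch hch h'
        subst h'
        obtain ⟨i, hi, hieq⟩ := List.mem_iff_getElem.mp hch
        refine hsp ?_
        have hpre : [' '] <+: (base.drop p).drop i := (pv_prefix_space_iff _ i hi).mpr hieq
        exact ((PySem.Chars.isIn_iff_infix (sub := [' ']) (s := base.drop p)).mp
          ((PySem.Chars.exists_prefix_drop_iff_isIn _ _).mp ⟨i, hpre⟩))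
      rw [show ((base.drop p).foldl (pvStep (b :: rest)) (0, [])).2 = base.drop p by
            rw [pv_scan_word (b :: rest) _ hns 0 []]; simp]
      simp only [List.flatten_append, List.flatten_cons, List.flatten_nil,
        List.append_nil, List.append_assoc]
      congr 1
      rw [show base.drop p = (base.drop c).drop (p - c) by
            rw [List.drop_drop]; congr 1; omega]
      exact (List.take_append_drop _ _).symm

-- the core equality on any common word list W
lemma pv_final (bits : List Char) (W : List (List Char))
    (hm : (bits ++ ['0','0','0','0','0','0','0','0']).length + 1 ≤ W.length)
    (hns : ∀ w ∈ W, ∀ c ∈ w, c ≠ ' ') :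
    PySem.Chars.join [] ((List.range W.length).foldl (fun acc i =>
        let acc := acc ++ [W.getD i []]
        if i < W.length - 1 then
          if i < (bits ++ ['0','0','0','0','0','0','0','0']).length then
            acc ++ [if (bits ++ ['0','0','0','0','0','0','0','0']).getD i ' ' == '1'
                    then ['\t'] else [' ']]
          else acc ++ [[' ']]
        else acc) [])
    = PySem.Chars.join []
        (pvPatch (PySem.Chars.join [' '] W) bits 0 0 []) := by
  have hne : W ≠ [] := by
    intro h; rw [h] at hm; simp at hm
  rw [pv_coreA _ _ hm]
  rw [show (0 : Int) = ((0 : Nat) : Int) from rfl,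
      pv_patch_eq (PySem.Chars.join [' '] W) bits 0 0 [] (Nat.le_refl 0) (Nat.zero_le _)]
  simp only [List.flatten_nil, List.drop_zero, Nat.sub_zero, List.take_zero,
    List.nil_append, List.append_nil]
  rw [show PySem.Chars.join [' '] W = List.intercalate [' '] W from rfl]
  rw [pv_scan_inter bits W hns 0 []]
  simp only [List.nil_append]
  rw [pv_interB_flatMap bits W 0 hne]
  congr 1
  apply List.flatMap_congr
  intro i _
  rw [Nat.zero_add, pv_sep_cons bits i]

-- every word of the cyclic table is a word of ws0
lemma pv_cyc_nospace (ws0 : List (List Char)) (h1 : 1 ≤ ws0.length) (m : Nat)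
    (h : ∀ w ∈ ws0, ∀ c ∈ w, c ≠ ' ') :
    ∀ w ∈ pvCyc ws0 m, ∀ c ∈ w, c ≠ ' ' := by
  intro w hw
  unfold pvCyc at hw
  rw [List.mem_map] at hw
  obtain ⟨k, _, rfl⟩ := hw
  have hk : k % ws0.length < ws0.length := Nat.mod_lt _ (by omega)
  rw [List.getD_eq_getElem?_getD, List.getElem?_eq_getElem hk]
  exact h _ (List.getElem_mem hk)

-- ===== VERDICT (by name: the statement is the Claim_ definition above) =====
theorem embed_whitespace_py_spec : Claim_equal_embed_whitespace_py := by
  intro ct sm _ hpre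
  unfold Pre_embed_whitespace_py at hpre
  unfold Spec_embed_whitespace_py
  simp only [embed_whitespace_py, embed_whitespace_py_alt]
  set ws0 := PySem.Chars.split₀ ct.toList with hws0
  set bits : List Char := sm.toList.flatMap (fun c => pvBits8 c.toNat) with hbits
  have h1 : 1 ≤ ws0.length := List.length_pos_of_ne_nil hpre
  have hbl : bits.length = 8 * sm.toList.length := pv_bits_len _
  have hLeq : (bits ++ ['0','0','0','0','0','0','0','0']).length
      = 8 * (sm.toList.length + 1) := by simp [hbl]; ring
  set bin : List Char := bits ++ ['0','0','0','0','0','0','0','0'] with hbin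
  set W : List (List Char) :=
    (if ws0.length < bin.length + 1 then pvWhilePad ws0.length bin.length ws0 else ws0)
    with hW
  have hWB : (if ws0.length < 8 * (sm.toList.length + 1) + 1 then
        ((List.replicate ((8 * (sm.toList.length + 1) + ws0.length) / ws0.length) ws0).flatten).take
          (8 * (sm.toList.length + 1) + 1)
      else ws0) = W := by
    rw [hW, ← hLeq]
    by_cases h : ws0.length < bin.length + 1
    · rw [if_pos h, if_pos h, pv_pad_cyc ws0 h1 bin.length h, pv_slice_cyc ws0 h1 bin.length]
    · rw [if_neg h, if_neg h]
  rw [hWB]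
  have hm : bin.length + 1 ≤ W.length := by
    rw [hW]
    by_cases h : ws0.length < bin.length + 1
    · rw [if_pos h, pv_pad_cyc ws0 h1 bin.length h]
      simp [pvCyc]
    · rw [if_neg h]; omega
  have hns : ∀ w ∈ W, ∀ c ∈ w, c ≠ ' ' := by
    have hns0 : ∀ w ∈ ws0, ∀ c ∈ w, c ≠ ' ' := pv_split_nospace ct.toList
    rw [hW]
    by_cases h : ws0.length < bin.length + 1
    · rw [if_pos h, pv_pad_cyc ws0 h1 bin.length h]
      exact pv_cyc_nospace ws0 h1 _ hns0
    · rw [if_neg h]; exact hns0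
  exact congrArg String.ofList (pv_final bits W hm hns)
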